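-- pv_equiv track=rewrite | github.com/manasguduri/Sentiment-Analysis | Classify.py | user_sentiment
-- ===== SOURCE A (Python) =====
-- from collections import Counter
-- from collections import Counter, defaultdict
--
-- def user_sentiment(user_name,Tweet_predicted):
--     user_senti = {}
--     for i in  Counter(zip(user_name,Tweet_predicted)):
--         if i[1] in user_senti:
--             user_senti[i[1]].append(i[0])
--         else:
--             user_senti[i[1]] = [i[0]]
--     user_sentiment_count =  dict(Counter(zip(user_name,Tweet_predicted)))
--     for i in user_senti:
--         seti = set(user_senti[i])
--         for j in user_senti:
--             setj = set(user_senti[j])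
--             if i != j:
--                 common = list(seti & setj)
--                 for name in common:
--                     if user_sentiment_count[(name,i)] > user_sentiment_count[(name,j)]:
--                         if name in user_senti[j]:
--                             user_senti[j].remove(name)
--     return user_senti
-- ===== SOURCE B (Python) =====
-- from collections import Counter
--
--
-- def user_sentiment(user_name, Tweet_predicted):
--     counts = Counter(zip(user_name, Tweet_predicted))
--     # max count per user, one pass over the distinct (name, sentiment) pairs
--     best = {}
--     for (name, _), c in counts.items():
--         if c > best.get(name, 0):
--             best[name] = c
--     # group names by sentiment (first-occurrence order of distinct pairs)
--     groups = {}
--     for (name, sent) in counts: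
--         groups.setdefault(sent, []).append(name)
--     # keep only a user's max-count sentiments
--     return {s: [n for n in names if counts[(n, s)] == best[n]]
--             for s, names in groups.items()}
-- ===== Notes on version B (the rewrite author's own statement) =====
-- stated objective: faster
-- what changed: Replaces A's cubic pairwise-sentiment removal loop (for every ordered pair of sentiments, intersect their user sets and remove the lower-count user from the loser's list) by one pass that records each user's maximum pair count in a dict and then filters each sentiment's name list to the names whose pair count equals that maximum.
import Mathlib
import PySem

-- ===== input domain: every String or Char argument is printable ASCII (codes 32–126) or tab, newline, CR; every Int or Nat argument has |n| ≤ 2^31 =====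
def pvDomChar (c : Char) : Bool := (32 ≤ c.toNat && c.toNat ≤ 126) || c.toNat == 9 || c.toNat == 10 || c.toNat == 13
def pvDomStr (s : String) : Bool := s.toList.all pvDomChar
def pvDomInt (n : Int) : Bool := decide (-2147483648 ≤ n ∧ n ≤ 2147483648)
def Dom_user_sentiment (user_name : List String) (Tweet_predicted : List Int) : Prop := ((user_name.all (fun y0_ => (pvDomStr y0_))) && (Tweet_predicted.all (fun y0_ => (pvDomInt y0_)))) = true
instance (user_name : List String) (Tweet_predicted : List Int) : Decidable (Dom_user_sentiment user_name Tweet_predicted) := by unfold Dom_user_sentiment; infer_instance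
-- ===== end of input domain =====

-- B replaces A's pairwise-sentiment removal loops by one max-count pass per user plus a filter
-- (A mutates no argument; dicts are returned as insertion-ordered association lists).

-- ===== PORT A =====
-- literal transliteration of A; `user_sentiment_count[(name,i)]` is ported as `getD _ 0`:
-- the key is always present there (name comes from a list built from the counter's keys).
def user_sentiment (user_name : List String) (Tweet_predicted : List Int) : List (Int × List String) :=
  let user_senti : PySem.Dict Int (List String) :=
    (PySem.Dict.counter (user_name.zip Tweet_predicted)).keys.foldl
      (fun d i =>
        if d.contains i.2 then d.modify i.2 [] (fun l => l ++ [i.1])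
        else d.insert i.2 [i.1]) PySem.Dict.empty
  let user_sentiment_count := PySem.Dict.counter (user_name.zip Tweet_predicted)
  let ks := user_senti.keys
  let final :=
    ks.foldl (fun st i =>
      let seti := PySem.Set.ofList (st.getD i [])
      ks.foldl (fun st j =>
        if i ≠ j then
          let setj := PySem.Set.ofList (st.getD j [])
          let common := PySem.Set.inter seti setj
          common.foldl (fun st name =>
            if user_sentiment_count.getD (name, i) 0 > user_sentiment_count.getD (name, j) 0 then
              if name ∈ st.getD j [] then
                st.modify j [] (fun l => (PySem.List.remove? l name).getD l)
              else st
            else st) st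
        else st) st) user_senti
  final.items

-- ===== PORT B =====
def user_sentiment_alt (user_name : List String) (Tweet_predicted : List Int) : List (Int × List String) :=
  let counts := PySem.Dict.counter (user_name.zip Tweet_predicted)
  let best : PySem.Dict String Int :=
    counts.items.foldl
      (fun b pc => if pc.2 > b.getD pc.1.1 0 then b.insert pc.1.1 pc.2 else b)
      PySem.Dict.empty
  let groups : PySem.Dict Int (List String) :=
    counts.keys.foldl (fun g p => g.modify p.2 [] (fun l => l ++ [p.1])) PySem.Dict.empty
  groups.items.map (fun sn =>
    (sn.1, sn.2.filter (fun n => counts.getD (n, sn.1) 0 == best.getD n 0)))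

-- ===== PRECONDITION & SPEC =====
def Spec_user_sentiment (user_name : List String) (Tweet_predicted : List Int) (out : List (Int × List String)) : Prop := out = user_sentiment_alt user_name Tweet_predicted
instance (user_name : List String) (Tweet_predicted : List Int) (out : List (Int × List String)) : Decidable (Spec_user_sentiment user_name Tweet_predicted out) := by unfold Spec_user_sentiment; infer_instance

-- ===== CLAIM (what is proved, stated in full; the proofs are below) =====
def Claim_equal_user_sentiment : Prop := ∀ (user_name : List String) (Tweet_predicted : List Int), Dom_user_sentiment user_name Tweet_predicted → Spec_user_sentiment user_name Tweet_predicted (user_sentiment user_name Tweet_predicted)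

-- ===== LEMMAS AND PROOFS =====

def pvDk (pairs : List (String × Int)) : List (String × Int) := PySem.Set.ofList pairs
def pvCount (pairs : List (String × Int)) (p : String × Int) : Int := (pairs.count p : Int)
def pvGrp (pairs : List (String × Int)) (s : Int) : List String :=
  ((pvDk pairs).filter (fun p => p.2 == s)).map Prod.fst
def pvBest (pairs : List (String × Int)) (n : String) : Int :=
  (pvDk pairs).foldl (fun m p => if p.1 == n then max m (pvCount pairs p) else m) 0
def pvKs (pairs : List (String × Int)) : List Int := PySem.Set.ofList ((pvDk pairs).map Prod.snd)
def pvGdict (pairs : List (String × Int)) : PySem.Dict Int (List String) :=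
  (pvDk pairs).foldl (fun g p => g.modify p.2 [] (fun l => l ++ [p.1])) PySem.Dict.empty

theorem pvDk_nodup (pairs : List (String × Int)) : (pvDk pairs).Nodup := PySem.Set.nodup_ofList pairs

theorem pvGrp_nodup (pairs : List (String × Int)) (s : Int) : (pvGrp pairs s).Nodup := by
  apply List.Nodup.map_on _ ((pvDk_nodup pairs).filter _)
  intro x hx y hy hxy
  have hx2 := (List.mem_filter.mp hx).2
  have hy2 := (List.mem_filter.mp hy).2
  simp only [beq_iff_eq] at hx2 hy2
  exact Prod.ext hxy (hx2.trans hy2.symm)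

theorem pvMem_grp (pairs : List (String × Int)) (n : String) (s : Int) :
    n ∈ pvGrp pairs s ↔ (n, s) ∈ pvDk pairs := by
  constructor
  · intro h
    obtain ⟨p, hp, hpn⟩ := List.mem_map.mp h
    have := List.mem_filter.mp hp
    have h2 : p.2 = s := by simpa using this.2
    have : p = (n, s) := by cases p; simp_all
    rw [← this]; exact (List.mem_filter.mp hp).1
  · intro h
    exact List.mem_map.mpr ⟨(n, s), List.mem_filter.mpr ⟨h, by simp⟩, rfl⟩

theorem pvGrp_nil (pairs : List (String × Int)) (s : Int) (h : s ∉ pvKs pairs) :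
    pvGrp pairs s = [] := by
  by_contra hne
  obtain ⟨n, hn⟩ := List.exists_mem_of_ne_nil _ hne
  have := (pvMem_grp pairs n s).mp hn
  apply h
  simp only [pvKs, PySem.Set.mem_ofList, List.mem_map]
  exact ⟨(n,s), this, rfl⟩

theorem pvCount_pos (pairs : List (String × Int)) (p : String × Int) (h : p ∈ pvDk pairs) :
    1 ≤ pvCount pairs p := by
  have : p ∈ pairs := (PySem.Set.mem_ofList pairs p).mp h
  have := List.count_pos_iff.mpr this
  unfold pvCount
  exact_mod_cast this

theorem pvFoldMax_init_le (f : String × Int → Int) (n : String) :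
    ∀ (L : List (String × Int)) (m₀ : Int),
      m₀ ≤ L.foldl (fun m p => if p.1 == n then max m (f p) else m) m₀ := by
  intro L
  induction L with
  | nil => intro m₀; simp
  | cons p L ih =>
      intro m₀
      simp only [List.foldl_cons]
      by_cases hp : p.1 = n
      · simp only [hp, beq_self_eq_true, if_true]
        exact le_trans (le_max_left _ _) (ih _)
      · simp only [beq_eq_false_iff_ne.mpr hp, Bool.false_eq_true, if_false]
        exact ih _

theorem pvFoldMax_ge_mem (f : String × Int → Int) (n : String) :
    ∀ (L : List (String × Int)) (m₀ : Int) (p : String × Int), p ∈ L → p.1 = n →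
      f p ≤ L.foldl (fun m q => if q.1 == n then max m (f q) else m) m₀ := by
  intro L
  induction L with
  | nil => intro m₀ p hp; simp at hp
  | cons q L ih =>
      intro m₀ p hp hpn
      simp only [List.foldl_cons]
      rcases List.mem_cons.mp hp with h | h
      · subst h
        simp only [hpn, beq_self_eq_true, if_true]
        exact le_trans (le_max_right _ _) (pvFoldMax_init_le f n L _)
      · by_cases hq : q.1 = n
        · simp only [hq, beq_self_eq_true, if_true]
          exact ih _ p h hpn
        · simp only [beq_eq_false_iff_ne.mpr hq, Bool.false_eq_true, if_false]
          exact ih _ p h hpn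

theorem pvFoldMax_attained (f : String × Int → Int) (n : String) :
    ∀ (L : List (String × Int)) (m₀ : Int),
      L.foldl (fun m p => if p.1 == n then max m (f p) else m) m₀ = m₀ ∨
        ∃ p ∈ L, p.1 = n ∧ L.foldl (fun m p => if p.1 == n then max m (f p) else m) m₀ = f p := by
  intro L
  induction L with
  | nil => intro m₀; left; rfl
  | cons q L ih =>
      intro m₀
      simp only [List.foldl_cons]
      by_cases hq : q.1 = n
      · simp only [hq, beq_self_eq_true, if_true]
        rcases ih (max m₀ (f q)) with h | ⟨p, hp, hpn, he⟩
        · rw [h]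
          rcases max_cases m₀ (f q) with ⟨he, _⟩ | ⟨he, _⟩
          · left; exact he
          · right; exact ⟨q, List.mem_cons_self, hq, he⟩
        · right; exact ⟨p, List.mem_cons_of_mem _ hp, hpn, he⟩
      · simp only [beq_eq_false_iff_ne.mpr hq, Bool.false_eq_true, if_false]
        rcases ih m₀ with h | ⟨p, hp, hpn, he⟩
        · left; exact h
        · right; exact ⟨p, List.mem_cons_of_mem _ hp, hpn, he⟩

theorem pvBest_le (pairs : List (String × Int)) (n : String) (s : Int)
    (h : (n, s) ∈ pvDk pairs) : pvCount pairs (n, s) ≤ pvBest pairs n :=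
  pvFoldMax_ge_mem (pvCount pairs) n (pvDk pairs) 0 (n, s) h rfl

theorem pvBest_attained (pairs : List (String × Int)) (n : String) (s : Int)
    (h : (n, s) ∈ pvDk pairs) :
    ∃ m : Int, (n, m) ∈ pvDk pairs ∧ pvCount pairs (n, m) = pvBest pairs n := by
  rcases pvFoldMax_attained (pvCount pairs) n (pvDk pairs) 0 with h0 | ⟨p, hp, hpn, he⟩
  · exfalso
    have h1 := pvBest_le pairs n s h
    have h2 := pvCount_pos pairs (n, s) h
    unfold pvBest at h1
    omega
  · subst hpn
    refine ⟨p.2, ?_, ?_⟩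
    · simpa using hp
    · simpa [pvBest] using he.symm

theorem pvGdict_getD (pairs : List (String × Int)) (s : Int) :
    (pvGdict pairs).getD s [] = pvGrp pairs s := by
  have h : pvGdict pairs =
      ((pvDk pairs).map Prod.swap).foldl
        (fun g q => g.modify q.1 [] (fun l => l ++ [q.2])) PySem.Dict.empty := by
    rw [List.foldl_map]; rfl
  rw [h, PySem.Dict.getD_foldl_modify_append]
  simp [pvGrp, List.filter_map, List.map_map, Function.comp_def, Prod.swap]

theorem pvGdict_keys (pairs : List (String × Int)) : (pvGdict pairs).keys = pvKs pairs := by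
  unfold pvGdict pvKs
  rw [PySem.Dict.keys_foldl_modify_key]
  simp [PySem.Dict.keys_empty, PySem.Set.update_nil_left]

theorem pvKs_nodup (pairs : List (String × Int)) : (pvKs pairs).Nodup :=
  PySem.Set.nodup_ofList _

theorem pvMem_Ks (pairs : List (String × Int)) (n : String) (s : Int)
    (h : (n, s) ∈ pvDk pairs) : s ∈ pvKs pairs := by
  unfold pvKs
  rw [PySem.Set.mem_ofList]
  exact List.mem_map.mpr ⟨(n, s), h, rfl⟩

theorem pvBestStep_getD (b : PySem.Dict String Int) (pc : (String × Int) × Int) (n : String) :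
    ((if pc.2 > b.getD pc.1.1 0 then b.insert pc.1.1 pc.2 else b).getD n 0)
      = if pc.1.1 == n then max (b.getD n 0) pc.2 else b.getD n 0 := by
  by_cases hn : pc.1.1 = n
  · simp only [hn, beq_self_eq_true, if_true]
    by_cases hgt : pc.2 > b.getD n 0
    · rw [if_pos hgt, PySem.Dict.getD_insert, if_pos rfl]; omega
    · rw [if_neg hgt]; omega
  · simp only [beq_eq_false_iff_ne.mpr hn, Bool.false_eq_true, if_false]
    by_cases hgt : pc.2 > b.getD pc.1.1 0
    · rw [if_pos hgt, PySem.Dict.getD_insert, if_neg (fun h => hn h.symm)]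
    · rw [if_neg hgt]

theorem pvBestD_getD : ∀ (L : List ((String × Int) × Int)) (b : PySem.Dict String Int) (n : String),
    (L.foldl (fun b pc => if pc.2 > b.getD pc.1.1 0 then b.insert pc.1.1 pc.2 else b) b).getD n 0
      = L.foldl (fun m pc => if pc.1.1 == n then max m pc.2 else m) (b.getD n 0) := by
  intro L
  induction L with
  | nil => intro b n; rfl
  | cons pc L ih =>
      intro b n
      simp only [List.foldl_cons]
      rw [ih, pvBestStep_getD]

theorem pvBest_eq (pairs : List (String × Int)) (n : String) :
    (((PySem.Dict.counter pairs).items).foldl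
        (fun b pc => if pc.2 > b.getD pc.1.1 0 then b.insert pc.1.1 pc.2 else b)
        PySem.Dict.empty).getD n 0 = pvBest pairs n := by
  rw [pvBestD_getD, PySem.Dict.items_counter, List.foldl_map]
  rfl
theorem pvRemove_mem (l : List String) (x : String) (hl : l.Nodup) (hx : x ∈ l) :
    (PySem.List.remove? l x).getD l = l.filter (fun y => !(y == x)) := by
  obtain ⟨i, hi⟩ : ∃ i, List.idxOf? x l = some i := by
    rwa [← Option.isSome_iff_exists, List.isSome_idxOf?]
  have he : l.erase x = l.eraseIdx i := by rw [List.erase_eq_eraseIdx, hi]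
  have : PySem.List.remove? l x = some (l.eraseIdx i) := by
    unfold PySem.List.remove?; rw [hi]; rfl
  rw [this, Option.getD_some, ← he, hl.erase_eq_filter]
  rfl

def pvRemLoop (cond : String → Prop) [DecidablePred cond] (j : Int) (names : List String)
    (st : PySem.Dict Int (List String)) : PySem.Dict Int (List String) :=
  names.foldl (fun st name =>
    if cond name then
      (if name ∈ st.getD j [] then st.modify j [] (fun l => (PySem.List.remove? l name).getD l)
       else st)
    else st) st

theorem pvRemLoop_spec (cond : String → Prop) [DecidablePred cond] (j : Int) :
    ∀ (names : List String) (st : PySem.Dict Int (List String)),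
      names.Nodup → (st.getD j []).Nodup →
      ((pvRemLoop cond j names st).getD j [] =
          (st.getD j []).filter (fun x => !(decide (x ∈ names) && decide (cond x)))
        ∧ (∀ k, k ≠ j → (pvRemLoop cond j names st).getD k [] = st.getD k [])
        ∧ (pvRemLoop cond j names st).keys = st.keys) := by
  intro names
  induction names with
  | nil =>
      intro st _ hnd
      refine ⟨?_, fun k _ => rfl, rfl⟩
      simp [pvRemLoop]
  | cons name names ih =>
      intro st hnames hnd
      have hname_nin : name ∉ names := (List.nodup_cons.mp hnames).1
      have hnames' : names.Nodup := (List.nodup_cons.mp hnames).2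
      by_cases hc : cond name
      · by_cases hm : name ∈ st.getD j []
        · -- removal fires
          set st' := st.modify j [] (fun l => (PySem.List.remove? l name).getD l) with hst'
          have hstep : pvRemLoop cond j (name :: names) st = pvRemLoop cond j names st' := by
            simp only [pvRemLoop, List.foldl_cons, if_pos hc, if_pos hm]
            rw [hst']
          have hj' : st'.getD j [] = (st.getD j []).filter (fun y => !(y == name)) := by
            rw [hst', PySem.Dict.getD_modify_self]
            exact pvRemove_mem _ _ hnd hm
          have hk' : ∀ k, k ≠ j → st'.getD k [] = st.getD k [] := fun k hk =>
            PySem.Dict.getD_modify_of_ne st [] _ hk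
          have hcont : st.contains j = true := by
            by_contra hcon
            have hfalse : st.contains j = false := by
              cases h : st.contains j
              · rfl
              · exact absurd h hcon
            have : st.getD j [] = [] := PySem.Dict.getD_of_not_contains st [] hfalse
            rw [this] at hm; exact absurd hm List.not_mem_nil
          have hkeys' : st'.keys = st.keys := by
            rw [hst', PySem.Dict.keys_modify]
            exact PySem.Dict.keys_insert_of_contains st _ hcont
          have hnd' : (st'.getD j []).Nodup := by rw [hj']; exact hnd.filter _
          obtain ⟨h1, h2, h3⟩ := ih st' hnames' hnd'
          rw [hstep]
          refine ⟨?_, fun k hk => (h2 k hk).trans (hk' k hk), h3.trans hkeys'⟩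
          rw [h1, hj', List.filter_filter]
          apply List.filter_congr
          intro x hx
          by_cases hxn : x = name
          · simp [hxn, hc]
          · simp [hxn, List.mem_cons]
        · -- cond holds but name no longer present
          have hstep : pvRemLoop cond j (name :: names) st = pvRemLoop cond j names st := by
            simp [pvRemLoop, hc, hm]
          obtain ⟨h1, h2, h3⟩ := ih st hnames' hnd
          rw [hstep]
          refine ⟨?_, h2, h3⟩
          rw [h1]
          apply List.filter_congr
          intro x hx
          have hxn : x ≠ name := fun h => hm (h ▸ hx)
          simp [hxn, List.mem_cons]
      · -- cond fails
        have hstep : pvRemLoop cond j (name :: names) st = pvRemLoop cond j names st := by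
          simp [pvRemLoop, hc]
        obtain ⟨h1, h2, h3⟩ := ih st hnames' hnd
        rw [hstep]
        refine ⟨?_, h2, h3⟩
        rw [h1]
        apply List.filter_congr
        intro x hx
        by_cases hxn : x = name
        · simp [hxn, hc, hname_nin]
        · simp [hxn, List.mem_cons]

def pvInner (cd : PySem.Dict (String × Int) Int) (i : Int) (seti : List String)
    (ks : List Int) (st : PySem.Dict Int (List String)) : PySem.Dict Int (List String) :=
  ks.foldl (fun st j =>
    if i ≠ j then
      (PySem.Set.inter seti (PySem.Set.ofList (st.getD j []))).foldl (fun st name =>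
        if cd.getD (name, i) 0 > cd.getD (name, j) 0 then
          (if name ∈ st.getD j [] then st.modify j [] (fun l => (PySem.List.remove? l name).getD l)
           else st)
        else st) st
    else st) st

theorem pvInner_spec (cd : PySem.Dict (String × Int) Int) (i : Int) (seti : List String)
    (hseti : seti.Nodup) :
    ∀ (J : List Int) (st : PySem.Dict Int (List String)), J.Nodup →
      (∀ k, (st.getD k []).Nodup) →
      ((∀ k, (pvInner cd i seti J st).getD k [] =
          if k ∈ J ∧ k ≠ i then
            (st.getD k []).filter
              (fun x => !(decide (x ∈ seti) && decide (cd.getD (x, i) 0 > cd.getD (x, k) 0)))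
          else st.getD k [])
        ∧ (pvInner cd i seti J st).keys = st.keys) := by
  intro J
  induction J with
  | nil =>
      intro st _ _
      exact ⟨fun k => by simp [pvInner], rfl⟩
  | cons j J ih =>
      intro st hJ hnd
      have hjn : j ∉ J := (List.nodup_cons.mp hJ).1
      have hJ' : J.Nodup := (List.nodup_cons.mp hJ).2
      by_cases hij : i ≠ j
      · -- the body runs: it is pvRemLoop at key j
        have hstep : pvInner cd i seti (j :: J) st =
            pvInner cd i seti J
              (pvRemLoop (fun name => cd.getD (name, i) 0 > cd.getD (name, j) 0) j
                (PySem.Set.inter seti (PySem.Set.ofList (st.getD j []))) st) := by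
          simp only [pvInner, List.foldl_cons, if_pos hij]
          rfl
        set names := PySem.Set.inter seti (PySem.Set.ofList (st.getD j [])) with hnames_def
        have hnames_nd : names.Nodup := List.Nodup.filter _ hseti
        obtain ⟨h1, h2, h3⟩ :=
          pvRemLoop_spec (fun name => cd.getD (name, i) 0 > cd.getD (name, j) 0) j names st
            hnames_nd (hnd j)
        set st' := pvRemLoop (fun name => cd.getD (name, i) 0 > cd.getD (name, j) 0) j names st
          with hst'_def
        have hnd' : ∀ k, (st'.getD k []).Nodup := by
          intro k
          by_cases hk : k = j
          · rw [hk, h1]; exact (hnd j).filter _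
          · rw [h2 k hk]; exact hnd k
        obtain ⟨ih1, ih2⟩ := ih st' hJ' hnd'
        rw [hstep]
        constructor
        · intro k
          by_cases hk : k = j
          · subst hk
            rw [ih1 k]
            have hkm : ¬(k ∈ J ∧ k ≠ i) := fun h => hjn h.1
            rw [if_neg hkm, if_pos ⟨List.mem_cons_self, fun h => hij h.symm⟩, h1]
            apply List.filter_congr
            intro x hx
            have : (x ∈ names) ↔ (x ∈ seti) := by
              rw [hnames_def, PySem.Set.mem_inter, PySem.Set.mem_ofList]
              exact ⟨fun h => h.1, fun h => ⟨h, hx⟩⟩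
            simp [this]
          · rw [ih1 k, h2 k hk]
            by_cases hkJ : k ∈ J ∧ k ≠ i
            · rw [if_pos hkJ, if_pos ⟨List.mem_cons_of_mem _ hkJ.1, hkJ.2⟩]
            · rw [if_neg hkJ, if_neg ?_]
              intro hcon
              exact hkJ ⟨(List.mem_cons.mp hcon.1).resolve_left hk, hcon.2⟩
        · rw [ih2, h3]
      · -- i = j: the branch is skipped
        have hstep : pvInner cd i seti (j :: J) st = pvInner cd i seti J st := by
          simp only [pvInner, List.foldl_cons, if_neg hij]
        obtain ⟨ih1, ih2⟩ := ih st hJ' hnd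
        rw [hstep]
        refine ⟨?_, ih2⟩
        intro k
        rw [ih1 k]
        push Not at hij
        by_cases hkJ : k ∈ J ∧ k ≠ i
        · rw [if_pos hkJ, if_pos ⟨List.mem_cons_of_mem _ hkJ.1, hkJ.2⟩]
        · rw [if_neg hkJ, if_neg ?_]
          intro hcon
          rcases List.mem_cons.mp hcon.1 with h | h
          · exact hcon.2 (by rw [h, ← hij])
          · exact hkJ ⟨h, hcon.2⟩

def pvOuterAux (cd : PySem.Dict (String × Int) Int) (ks R : List Int)
    (st : PySem.Dict Int (List String)) : PySem.Dict Int (List String) :=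
  R.foldl (fun st i => pvInner cd i (PySem.Set.ofList (st.getD i [])) ks st) st

-- outer-loop specification: the invariant q records which names are still alive per sentiment
theorem pvOuter_spec (pairs : List (String × Int)) :
    ∀ (R : List Int) (st : PySem.Dict Int (List String)) (q : Int → String → Bool),
      (∀ k, st.getD k [] = (pvGrp pairs k).filter (q k)) →
      st.keys = pvKs pairs →
      (∀ n s, (n, s) ∈ pvDk pairs → pvCount pairs (n, s) = pvBest pairs n → q s n = true) →
      (∀ n s, (n, s) ∈ pvDk pairs → q s n = true →
          pvCount pairs (n, s) = pvBest pairs n ∨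
            ∃ m, m ∈ R ∧ (n, m) ∈ pvDk pairs ∧ pvCount pairs (n, m) = pvBest pairs n) →
      ((∀ k, (pvOuterAux (PySem.Dict.counter pairs) (pvKs pairs) R st).getD k [] =
          (pvGrp pairs k).filter (fun n => pvCount pairs (n, k) == pvBest pairs n))
        ∧ (pvOuterAux (PySem.Dict.counter pairs) (pvKs pairs) R st).keys = pvKs pairs) := by
  intro R
  induction R with
  | nil =>
      intro st q hst hkeys hmax hprog
      refine ⟨?_, hkeys⟩
      intro k
      rw [show pvOuterAux (PySem.Dict.counter pairs) (pvKs pairs) [] st = st from rfl, hst k]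
      apply List.filter_congr
      intro x hx
      have hdk : (x, k) ∈ pvDk pairs := (pvMem_grp pairs x k).mp hx
      by_cases hb : pvCount pairs (x, k) = pvBest pairs x
      · rw [hmax x k hdk hb]
        simp [hb]
      · have hq : q k x = false := by
          cases hq : q k x
          · rfl
          · rcases hprog x k hdk hq with h | ⟨m, hm, _⟩
            · exact absurd h hb
            · exact absurd hm List.not_mem_nil
        rw [hq]
        simp [hb]
  | cons i R ih =>
      intro st q hst hkeys hmax hprog
      have hgrpnd : ∀ k, (st.getD k []).Nodup := fun k => by
        rw [hst k]; exact (pvGrp_nodup pairs k).filter _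
      have hseti_eq : PySem.Set.ofList (st.getD i []) = (pvGrp pairs i).filter (q i) := by
        rw [PySem.Set.ofList_eq_self_of_nodup _ (hgrpnd i), hst i]
      have hseti_nd : (PySem.Set.ofList (st.getD i [])).Nodup := by
        rw [hseti_eq]; exact (pvGrp_nodup pairs i).filter _
      have hstep : pvOuterAux (PySem.Dict.counter pairs) (pvKs pairs) (i :: R) st
          = pvOuterAux (PySem.Dict.counter pairs) (pvKs pairs) R
              (pvInner (PySem.Dict.counter pairs) i (PySem.Set.ofList (st.getD i []))
                (pvKs pairs) st) := by
        simp only [pvOuterAux, List.foldl_cons]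
      obtain ⟨h1, h2⟩ :=
        pvInner_spec (PySem.Dict.counter pairs) i (PySem.Set.ofList (st.getD i [])) hseti_nd
          (pvKs pairs) st (pvKs_nodup pairs) hgrpnd
      rw [hstep]
      refine ih _ (fun s n => decide (q s n = true ∧
          ¬(s ≠ i ∧ n ∈ pvGrp pairs i ∧ q i n = true ∧
              pvCount pairs (n, i) > pvCount pairs (n, s)))) ?_ ?_ ?_ ?_
      · -- the new state is pvGrp filtered by the new predicate
        intro k
        rw [h1 k]
        by_cases hki : k = i
        · subst hki
          rw [if_neg (fun h => h.2 rfl), hst k]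
          apply List.filter_congr
          intro x hx
          simp
        · by_cases hkK : k ∈ pvKs pairs
          · rw [if_pos ⟨hkK, hki⟩, hst k, List.filter_filter]
            apply List.filter_congr
            intro x hx
            have hmem : (x ∈ PySem.Set.ofList (st.getD i [])) ↔ (x ∈ pvGrp pairs i ∧ q i x = true) := by
              rw [hseti_eq, List.mem_filter]
            by_cases hgi : x ∈ pvGrp pairs i <;>
              cases hq2 : q i x <;>
                simp [hmem, hgi, hq2, hki, PySem.Dict.getD_counter, pvCount, Bool.and_comm,
                  ← decide_not, not_lt]
          · rw [if_neg (fun h => hkK h.1), hst k, pvGrp_nil pairs k hkK]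
            simp
      · rw [h2, hkeys]
      · -- maxima stay alive
        intro n s hdk hbest
        rw [decide_eq_true_eq]
        refine ⟨hmax n s hdk hbest, ?_⟩
        rintro ⟨hsi, hgi, hqi, hgt⟩
        have hle := pvBest_le pairs n i ((pvMem_grp pairs n i).mp hgi)
        omega
      · -- progress: every survivor is a maximum or its maximum is still unprocessed
        intro n s hdk hq'
        rw [decide_eq_true_eq] at hq'
        obtain ⟨hq, hnk⟩ := hq'
        rcases hprog n s hdk hq with h | ⟨m, hm, hmdk, hmbest⟩
        · exact Or.inl h
        · rcases List.mem_cons.mp hm with hmi | hmR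
          · subst hmi
            by_cases hb : pvCount pairs (n, s) = pvBest pairs n
            · exact Or.inl hb
            · exfalso
              apply hnk
              have hle := pvBest_le pairs n s hdk
              refine ⟨?_, (pvMem_grp pairs n m).mpr hmdk, hmax n m hmdk hmbest, ?_⟩
              · intro h; rw [← h] at hmbest; exact hb hmbest
              · omega
          · exact Or.inr ⟨m, hmR, hmdk, hmbest⟩


-- A's grouping loop builds exactly the modify-append fold over the distinct pairs
def pvABuild (pairs : List (String × Int)) : PySem.Dict Int (List String) :=
  (PySem.Dict.counter pairs).keys.foldl
    (fun d i =>
      if d.contains i.2 then d.modify i.2 [] (fun l => l ++ [i.1])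
      else d.insert i.2 [i.1]) PySem.Dict.empty

theorem pvABuild_eq (pairs : List (String × Int)) : pvABuild pairs = pvGdict pairs := by
  unfold pvABuild pvGdict
  rw [PySem.Dict.keys_counter]
  have hfun : (fun (d : PySem.Dict Int (List String)) (i : String × Int) =>
      if d.contains i.2 then d.modify i.2 [] (fun l => l ++ [i.1])
      else d.insert i.2 [i.1])
      = (fun (g : PySem.Dict Int (List String)) (p : String × Int) =>
          g.modify p.2 [] (fun l => l ++ [p.1])) := by
    funext d p
    by_cases h : d.contains p.2
    · rw [if_pos h]
    · have hf : d.contains p.2 = false := by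
        cases hc : d.contains p.2
        · rfl
        · exact absurd hc h
      rw [if_neg h]
      show d.insert p.2 [p.1] = d.insert p.2 (d.getD p.2 [] ++ [p.1])
      rw [PySem.Dict.getD_of_not_contains d [] hf]
      rfl
  rw [hfun]
  rfl

theorem pvA_eq (user_name : List String) (Tweet_predicted : List Int) :
    user_sentiment user_name Tweet_predicted =
      (pvOuterAux (PySem.Dict.counter (user_name.zip Tweet_predicted))
        (pvABuild (user_name.zip Tweet_predicted)).keys
        (pvABuild (user_name.zip Tweet_predicted)).keys
        (pvABuild (user_name.zip Tweet_predicted))).items := rfl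

theorem pvB_groups_eq (pairs : List (String × Int)) :
    (PySem.Dict.counter pairs).keys.foldl
      (fun g p => g.modify p.2 [] (fun l => l ++ [p.1])) PySem.Dict.empty = pvGdict pairs := by
  rw [PySem.Dict.keys_counter]; rfl

theorem pvGdict_items (pairs : List (String × Int)) :
    (pvGdict pairs).items = (pvKs pairs).map (fun k => (k, pvGrp pairs k)) := by
  rw [PySem.Dict.items_eq_map_keys (pvGdict pairs) (by rw [pvGdict_keys]; exact pvKs_nodup pairs) [],
    pvGdict_keys]
  exact List.map_congr_left (fun k _ => by rw [pvGdict_getD])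

theorem pvAlt_eq (user_name : List String) (Tweet_predicted : List Int) :
    user_sentiment_alt user_name Tweet_predicted =
      ((PySem.Dict.counter (user_name.zip Tweet_predicted)).keys.foldl
          (fun g p => g.modify p.2 [] (fun l => l ++ [p.1])) PySem.Dict.empty).items.map
        (fun sn => (sn.1, sn.2.filter (fun n =>
          (PySem.Dict.counter (user_name.zip Tweet_predicted)).getD (n, sn.1) 0 ==
            ((PySem.Dict.counter (user_name.zip Tweet_predicted)).items.foldl
                (fun b pc => if pc.2 > b.getD pc.1.1 0 then b.insert pc.1.1 pc.2 else b)
                PySem.Dict.empty).getD n 0))) := rfl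

-- ===== VERDICT (by name: the statement is the Claim_ definition above) =====
theorem user_sentiment_spec : Claim_equal_user_sentiment := by
  unfold Claim_equal_user_sentiment
  intro user_name Tweet_predicted _
  unfold Spec_user_sentiment
  obtain ⟨hout, hkeys⟩ :=
    pvOuter_spec (user_name.zip Tweet_predicted) (pvKs (user_name.zip Tweet_predicted))
      (pvGdict (user_name.zip Tweet_predicted)) (fun _ _ => true)
      (fun k => by rw [pvGdict_getD]; simp)
      (pvGdict_keys _)
      (fun n s _ _ => rfl)
      (fun n s hdk _ => by
        obtain ⟨m, hmdk, hmb⟩ := pvBest_attained _ n s hdk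
        exact Or.inr ⟨m, pvMem_Ks _ n m hmdk, hmdk, hmb⟩)
  -- A's side
  rw [pvA_eq, pvABuild_eq, pvGdict_keys,
    PySem.Dict.items_eq_map_keys _ (by rw [hkeys]; exact pvKs_nodup _) [], hkeys]
  -- B's side
  rw [pvAlt_eq, pvB_groups_eq, pvGdict_items, List.map_map]
  apply List.map_congr_left
  intro k _
  rw [hout k]
  show (k, _) = (k, _)
  refine congrArg _ ?_
  apply List.filter_congr
  intro n _
  rw [pvBest_eq, PySem.Dict.getD_counter]
  rfl
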